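-- pv_equiv track=rewrite | github.com/Bigsby/aoc | 2020/18/py/run.py | getNextToken
-- ===== SOURCE A (Python) =====
-- from typing import List, Tuple
--
-- def getNextToken(expression: str) -> Tuple[str,str]:
--     currentToken = ""
--     for index, c in enumerate(expression):
--         if c == " ":
--             return currentToken, expression[index + 1:].strip()
--         if currentToken.isdigit() and not c.isdigit():
--             return currentToken, expression[index:].strip()
--         currentToken += c
--     return currentToken, ""
-- ===== SOURCE B (Python) =====
-- def getNextToken(expression):
--     if not expression:
--         return "", ""
--     c = expression[0]
--     if c == " ":
--         return "", expression[1:].strip()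
--     if c.isdigit():
--         i = 1
--         while i < len(expression) and expression[i].isdigit():
--             i += 1
--         return expression[:i], expression[i:].strip()
--     i = expression.find(" ")
--     if i < 0:
--         return expression, ""
--     return expression[:i], expression[i + 1:].strip()
-- ===== Notes on version B (the rewrite author's own statement) =====
-- stated objective: faster
-- what changed: Replaces A's char-by-char accumulator loop (with quadratic string concatenation) by a single case split on the first character plus slicing: empty / leading space / maximal leading digit run / split at the first space found.
import Mathlib
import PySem

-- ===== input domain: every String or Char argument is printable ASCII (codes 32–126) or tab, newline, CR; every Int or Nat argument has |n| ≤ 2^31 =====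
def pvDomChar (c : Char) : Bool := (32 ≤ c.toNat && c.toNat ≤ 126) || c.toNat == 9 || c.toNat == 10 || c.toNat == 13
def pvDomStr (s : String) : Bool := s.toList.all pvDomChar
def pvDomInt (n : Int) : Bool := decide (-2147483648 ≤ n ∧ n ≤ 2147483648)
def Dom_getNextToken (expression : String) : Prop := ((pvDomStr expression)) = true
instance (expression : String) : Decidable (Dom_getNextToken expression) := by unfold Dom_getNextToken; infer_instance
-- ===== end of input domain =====

-- B branches once on the first character (empty / leading space / maximal digit run / first-space split)
-- instead of A's char-by-char accumulator loop; measured faster (A rebuilds the token string char by char).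

-- ===== PORT A =====
def gntGo (orig : List Char) (index : Nat) (cur : List Char) : List Char → List Char × List Char
  | [] => (cur, [])
  | c :: rest =>
    if c = ' ' then
      (cur, PySem.Chars.strip (PySem.List.slice orig (some ((index : Int) + 1)) none))
    else if PySem.Chars.strIsdigit cur && !PySem.Chars.isdigit c then
      (cur, PySem.Chars.strip (PySem.List.slice orig (some (index : Int)) none))
    else
      gntGo orig (index + 1) (cur ++ [c]) rest

def getNextToken (expression : String) : String × String :=
  let r := gntGo expression.toList 0 [] expression.toList
  (String.ofList r.1, String.ofList r.2)

-- ===== PORT B =====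
-- the 'while i < len(expression) and expression[i].isdigit(): i += 1' loop of Source B
def altDigitEnd (s : List Char) (i : Nat) : Nat :=
  if h : i < s.length then
    if PySem.Chars.isdigit s[i] then altDigitEnd s (i + 1) else i
  else i
termination_by s.length - i

def getNextToken_alt (expression : String) : String × String :=
  match expression.toList with
  | [] => ("", "")
  | c :: _ =>
    if c = ' ' then
      ("", String.ofList (PySem.Chars.strip (PySem.List.slice expression.toList (some 1) none)))
    else if PySem.Chars.isdigit c then
      let i := altDigitEnd expression.toList 1
      (String.ofList (PySem.List.slice expression.toList none (some (i : Int))),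
       String.ofList (PySem.Chars.strip (PySem.List.slice expression.toList (some (i : Int)) none)))
    else
      let i := PySem.Chars.find expression.toList [' ']
      if i < 0 then (expression, "")
      else (String.ofList (PySem.List.slice expression.toList none (some i)),
            String.ofList (PySem.Chars.strip (PySem.List.slice expression.toList (some (i + 1)) none)))

-- ===== PRECONDITION & SPEC =====
def Spec_getNextToken (expression : String) (out : String × String) : Prop := out = getNextToken_alt expression
instance (expression : String) (out : String × String) : Decidable (Spec_getNextToken expression out) := by unfold Spec_getNextToken; infer_instance

-- ===== CLAIM (what is proved, stated in full; the proofs are below) =====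
def Claim_equal_getNextToken : Prop := ∀ (expression : String), Dom_getNextToken expression → Spec_getNextToken expression (getNextToken expression)

-- ===== LEMMAS AND PROOFS =====

-- A's loop, rephrased on the remaining suffix only (proof-only helper)
def loc (cur : List Char) : List Char → List Char × List Char
  | [] => (cur, [])
  | c :: rs =>
    if c = ' ' then (cur, PySem.Chars.strip rs)
    else if PySem.Chars.strIsdigit cur && !PySem.Chars.isdigit c then (cur, PySem.Chars.strip (c :: rs))
    else loc (cur ++ [c]) rs

lemma strip_nil : PySem.Chars.strip [] = [] := by decide

lemma strip_cons_space (l : List Char) : PySem.Chars.strip (' ' :: l) = PySem.Chars.strip l := by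
  simp [PySem.Chars.strip, PySem.Chars.lstrip, (by decide : PySem.Chars.isspace ' ' = true)]

lemma strIsdigit_nil : PySem.Chars.strIsdigit [] = false := by decide

lemma strIsdigit_false {cur : List Char} {x : Char} (hx : x ∈ cur)
    (hd : PySem.Chars.isdigit x = false) : PySem.Chars.strIsdigit cur = false := by
  have h : cur.all PySem.Chars.isdigit = false := by
    rw [List.all_eq_false]; exact ⟨x, hx, by simp [hd]⟩
  simp [PySem.Chars.strIsdigit, h]

lemma strIsdigit_true {cur : List Char} (h1 : cur ≠ [])
    (h2 : cur.all PySem.Chars.isdigit = true) : PySem.Chars.strIsdigit cur = true := by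
  simp [PySem.Chars.strIsdigit, h2, h1]

lemma gntGo_eq_loc (orig : List Char) : ∀ (rest : List Char) (k : Nat) (cur : List Char),
    orig.drop k = rest → gntGo orig k cur rest = loc cur rest := by
  intro rest
  induction rest with
  | nil => intro k cur h; simp [gntGo, loc]
  | cons c rs ih =>
    intro k cur h
    have hk1 : orig.drop (k + 1) = rs := by
      rw [← List.tail_drop, h]; rfl
    have hs1 : PySem.List.slice orig (some ((k : Int) + 1)) none = rs := by
      rw [show ((k : Int) + 1) = (((k + 1 : Nat) : Int)) by push_cast; ring]
      rw [PySem.List.slice_from orig (by positivity)]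
      simpa using hk1
    have hs0 : PySem.List.slice orig (some ((k : Int))) none = c :: rs := by
      rw [PySem.List.slice_from orig (by positivity)]
      simpa using h
    by_cases hc : c = ' '
    · simp [gntGo, loc, hc, hs1]
    · by_cases hb : (PySem.Chars.strIsdigit cur && !PySem.Chars.isdigit c) = true
      · simp [gntGo, loc, hc, hb, hs0]
      · simp only [gntGo, loc, if_neg hc, hb, Bool.false_eq_true, if_false]
        exact ih (k + 1) (cur ++ [c]) hk1

lemma loc_digits : ∀ (rest cur : List Char), cur ≠ [] → cur.all PySem.Chars.isdigit = true →
    loc cur rest = (cur ++ rest.takeWhile PySem.Chars.isdigit,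
                    PySem.Chars.strip (rest.dropWhile PySem.Chars.isdigit)) := by
  intro rest
  induction rest with
  | nil => intro cur _ _; simp [loc, strip_nil]
  | cons c rs ih =>
    intro cur h1 h2
    by_cases hc : c = ' '
    · subst hc
      simp [loc, (by decide : PySem.Chars.isdigit ' ' = false), strip_cons_space]
    · by_cases hd : PySem.Chars.isdigit c
      · have hrec := ih (cur ++ [c]) (by simp) (by simp [List.all_append, h2, hd])
        simp [loc, hc, hrec, hd]
      · have ht : PySem.Chars.strIsdigit cur = true := strIsdigit_true h1 h2
        simp [loc, hc, ht, hd]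

lemma loc_nondigit : ∀ (rest cur : List Char), (∃ x ∈ cur, PySem.Chars.isdigit x = false) →
    loc cur rest = (cur ++ rest.takeWhile (fun c => !(c == ' ')),
                    PySem.Chars.strip ((rest.dropWhile (fun c => !(c == ' '))).tail)) := by
  intro rest
  induction rest with
  | nil => intro cur _; simp [loc, strip_nil]
  | cons c rs ih =>
    intro cur h
    obtain ⟨x, hx, hxd⟩ := h
    have hf : PySem.Chars.strIsdigit cur = false := strIsdigit_false hx hxd
    by_cases hc : c = ' '
    · subst hc
      simp [loc]
    · have hrec := ih (cur ++ [c]) ⟨x, by simp [hx], hxd⟩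
      simp [loc, hc, hf, hrec]

lemma take_drop_takeWhile (p : Char → Bool) : ∀ l : List Char,
    l.take (l.takeWhile p).length = l.takeWhile p ∧
    l.drop (l.takeWhile p).length = l.dropWhile p := by
  intro l
  induction l with
  | nil => simp
  | cons a l' ih =>
    by_cases ha : p a
    · simp [ha, ih.1, ih.2]
    · simp [ha]

lemma altDigitEnd_eq (s : List Char) : ∀ (n i : Nat), s.length - i ≤ n →
    altDigitEnd s i = i + ((s.drop i).takeWhile PySem.Chars.isdigit).length := by
  intro n
  induction n with
  | zero =>
    intro i hn
    have hi : s.length ≤ i := by omega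
    rw [altDigitEnd]
    simp [Nat.not_lt.mpr hi, List.drop_eq_nil_of_le hi]
  | succ m ih =>
    intro i hn
    by_cases h : i < s.length
    · have hdrop : s.drop i = s[i] :: s.drop (i + 1) := List.drop_eq_getElem_cons h
      by_cases hd : PySem.Chars.isdigit s[i]
      · rw [altDigitEnd]
        simp only [h, dif_pos, hd, if_pos]
        rw [ih (i + 1) (by omega), hdrop, List.takeWhile_cons, if_pos hd]
        simp; omega
      · rw [altDigitEnd]
        simp only [h, dif_pos, hd, Bool.false_eq_true, if_false]
        rw [hdrop, List.takeWhile_cons, if_neg (by simp [hd])]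
        simp
    · rw [altDigitEnd]
      simp [h, List.drop_eq_nil_of_le (by omega : s.length ≤ i)]

-- takeWhile/dropWhile of (≠ ' ') when the first space sits at index n
lemma tw_space : ∀ (l : List Char) (n : Nat) (hn : n < l.length), l[n] = ' ' →
    (∀ j (hj : j < n), l[j]'(Nat.lt_trans hj hn) ≠ ' ') →
    l.takeWhile (fun c => !(c == ' ')) = l.take n ∧
    l.dropWhile (fun c => !(c == ' ')) = l.drop n := by
  intro l
  induction l with
  | nil => intro n hn; simp at hn
  | cons a l' ih =>
    intro n hn ha hmin
    cases n with
    | zero =>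
      simp at ha
      simp [ha]
    | succ m =>
      have h0 : a ≠ ' ' := by
        have := hmin 0 (by omega)
        simpa using this
      have hm : m < l'.length := by simpa using hn
      have ham : l'[m] = ' ' := by simpa using ha
      have hmin' : ∀ j (hj : j < m), l'[j]'(Nat.lt_trans hj hm) ≠ ' ' := by
        intro j hj
        have := hmin (j + 1) (by omega)
        simpa using this
      have hres := ih m hm ham hmin'
      simp [h0, hres.1, hres.2]

-- takeWhile/dropWhile of (≠ ' ') when there is no space at all
lemma tw_nospace : ∀ l : List Char, (∀ x ∈ l, x ≠ ' ') →
    l.takeWhile (fun c => !(c == ' ')) = l ∧ l.dropWhile (fun c => !(c == ' ')) = [] := by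
  intro l
  induction l with
  | nil => intro _; simp
  | cons a l' ih =>
    intro h
    have h0 : a ≠ ' ' := h a (by simp)
    have hres := ih (fun x hx => h x (by simp [hx]))
    simp [h0, hres.1, hres.2]

theorem getNextToken_spec : Claim_equal_getNextToken := by
  intro expression _
  unfold Spec_getNextToken getNextToken getNextToken_alt
  cases h : expression.toList with
  | nil =>
    dsimp only
    simp [gntGo]
  | cons c t =>
    by_cases hc : c = ' '
    · -- leading space
      subst hc
      dsimp only
      have hstep : gntGo (' ' :: t) 0 [] (' ' :: t)
          = ([], PySem.Chars.strip (PySem.List.slice (' ' :: t) (some 1) none)) := by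
        simp [gntGo]
      simp [hstep]
    · by_cases hd : PySem.Chars.isdigit c
      · -- leading digit: maximal digit run
        dsimp only
        have hstep : gntGo (c :: t) 0 [] (c :: t) = gntGo (c :: t) 1 [c] t := by
          simp [gntGo, hc, strIsdigit_nil]
        have hloc : gntGo (c :: t) 1 [c] t = loc [c] t :=
          gntGo_eq_loc (c :: t) t 1 [c] rfl
        have hdig := loc_digits t [c] (by simp) (by simp [hd])
        have hend : altDigitEnd (c :: t) 1 = 1 + (t.takeWhile PySem.Chars.isdigit).length := by
          have := altDigitEnd_eq (c :: t) (c :: t).length 1 (by omega)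
          simpa using this
        have htake : (c :: t).take (1 + (t.takeWhile PySem.Chars.isdigit).length)
            = c :: t.takeWhile PySem.Chars.isdigit := by
          rw [Nat.add_comm, List.take_succ_cons, (take_drop_takeWhile PySem.Chars.isdigit t).1]
        have hdrop : (c :: t).drop (1 + (t.takeWhile PySem.Chars.isdigit).length)
            = t.dropWhile PySem.Chars.isdigit := by
          rw [Nat.add_comm, List.drop_succ_cons, (take_drop_takeWhile PySem.Chars.isdigit t).2]
        have hs1 : PySem.List.slice (c :: t) none (some ((altDigitEnd (c :: t) 1 : Nat) : Int))
            = c :: t.takeWhile PySem.Chars.isdigit := by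
          rw [PySem.List.slice_to _ (by positivity), hend]
          simpa using htake
        have hs2 : PySem.List.slice (c :: t) (some ((altDigitEnd (c :: t) 1 : Nat) : Int)) none
            = t.dropWhile PySem.Chars.isdigit := by
          rw [PySem.List.slice_from _ (by positivity), hend]
          simpa using hdrop
        simp only [if_neg hc, if_pos hd]
        rw [hstep, hloc, hdig]
        simp [hs1, hs2]
      · -- neither space nor digit: split at the first space
        dsimp only
        have hstep : gntGo (c :: t) 0 [] (c :: t) = gntGo (c :: t) 1 [c] t := by
          simp [gntGo, hc, strIsdigit_nil]
        have hloc : gntGo (c :: t) 1 [c] t = loc [c] t :=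
          gntGo_eq_loc (c :: t) t 1 [c] rfl
        have hnd := loc_nondigit t [c] ⟨c, by simp, by simpa using hd⟩
        have hqc : (fun x => !(x == ' ')) c = true := by simp [hc]
        simp only [if_neg hc, if_neg hd]
        rw [hstep, hloc, hnd]
        by_cases hneg : PySem.Chars.find (c :: t) [' '] < 0
        · -- no space anywhere
          have hm1 : PySem.Chars.find (c :: t) [' '] = -1 := by
            have := PySem.Chars.neg_one_le_find (c :: t) [' ']
            omega
          have hnotin : ∀ x ∈ c :: t, x ≠ ' ' := by
            intro x hx hxe
            obtain ⟨p, q, hpq⟩ := List.append_of_mem hx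
            exact (PySem.Chars.find_eq_neg_one_iff (c :: t) [' ']).mp hm1
              ⟨p, q, by rw [hpq, hxe]; simp⟩
          have hno := tw_nospace t (fun x hx => hnotin x (by simp [hx]))
          rw [if_pos hneg]
          rw [hno.1, hno.2]
          have : String.ofList (c :: t) = expression := by rw [← h, String.ofList_toList]
          simp [strip_nil, this]
        · -- space found at index i ≥ 0
          have h0i : 0 ≤ PySem.Chars.find (c :: t) [' '] := by omega
          obtain ⟨hpre, hmin⟩ := PySem.Chars.find_spec h0i
          set i := PySem.Chars.find (c :: t) [' '] with hi
          set n := i.toNat with hn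
          obtain ⟨u, hu⟩ := hpre
          have hu' : (c :: t).drop n = ' ' :: u := by simpa using hu.symm
          have hlt : n < (c :: t).length := by
            by_contra hge
            rw [List.drop_eq_nil_of_le (by omega)] at hu'
            exact absurd hu' (by simp)
          have hgn : (c :: t)[n] = ' ' := by
            have hcons := List.drop_eq_getElem_cons hlt
            rw [hu'] at hcons
            exact (List.cons.injEq _ _ _ _ ▸ hcons).1.symm
          have hmin' : ∀ j (hj : j < n), (c :: t)[j]'(Nat.lt_trans hj hlt) ≠ ' ' := by
            intro j hj hje
            apply hmin j hj
            refine ⟨(c :: t).drop (j + 1), ?_⟩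
            have := List.drop_eq_getElem_cons (Nat.lt_trans hj hlt)
            rw [hje] at this
            simpa using this.symm
          have htw := tw_space (c :: t) n hlt hgn hmin'
          have htw1 : c :: t.takeWhile (fun x => !(x == ' ')) = (c :: t).take n := by
            rw [← htw.1, List.takeWhile_cons, if_pos hqc]
          have htw2 : t.dropWhile (fun x => !(x == ' ')) = (c :: t).drop n := by
            rw [← htw.2, List.dropWhile_cons, if_pos hqc]
          have hs1 : PySem.List.slice (c :: t) none (some i) = (c :: t).take n := by
            rw [PySem.List.slice_to _ h0i]
          have hs2 : PySem.List.slice (c :: t) (some (i + 1)) none = (c :: t).drop (n + 1) := by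
            rw [PySem.List.slice_from _ (by omega)]
            congr 1
            omega
          rw [if_neg hneg]
          rw [htw2, List.tail_drop, hs1, hs2, ← htw1]
          simp
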